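-- pv_equiv track=rewrite | github.com/gaboza12/we-are-algorithm | 724thomas/Week3/3108.py | solution
-- ===== SOURCE A (Python) =====
-- def solution(n, squares):
--     def is_collide(square1, square2):
--         x1_1, y1_1, x2_1, y2_1 = square1
--         x1_2, y1_2, x2_2, y2_2 = square2
--         if x2_1 < x1_2 or x1_1 > x2_2 or y2_1 < y1_2 or y1_1 > y2_2:
--             return False
--         if x1_1 < x1_2 and y1_1 < y1_2 and x2_1 > x2_2 and y2_1 > y2_2:
--             return False
--         if x1_2 < x1_1 and y1_2 < y1_1 and x2_2 > x2_1 and y2_2 > y2_1: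
--             return False
--         return True
--
--     def find(x):
--         if x != par[x]:
--             par[x] = find(par[x])
--         return par[x]
--
--     def union(a, b):
--         ra = find(a)
--         rb = find(b)
--         if ra == rb:
--             return False
--         if rank[ra] > rank[rb]:
--             par[rb] = ra
--         elif rank[ra] < rank[rb]:
--             par[ra] = rb
--         else:
--             par[rb] = ra
--             rank[ra] += 1
--         return True
--
--     par = [i for i in range(n)]
--     rank = [1 for _ in range(n)]
--     ans = n
--     for i in range(n - 1):
--         for j in range(i + 1, n):
--             if is_collide(squares[i], squares[j]):
--                 if union(i, j):
--                     ans -= 1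
--
--     for square in squares:
--         if is_collide(square, [0,0,0,0]):
--             ans-=1
--             break
--
--     return ans
-- ===== SOURCE B (Python) =====
-- def solution(n, squares):
--     def is_collide(square1, square2):
--         x1_1, y1_1, x2_1, y2_1 = square1
--         x1_2, y1_2, x2_2, y2_2 = square2
--         if x2_1 < x1_2 or x1_1 > x2_2 or y2_1 < y1_2 or y1_1 > y2_2:
--             return False
--         if x1_1 < x1_2 and y1_1 < y1_2 and x2_1 > x2_2 and y2_1 > y2_2:
--             return False
--         if x1_2 < x1_1 and y1_2 < y1_1 and x2_2 > x2_1 and y2_2 > y2_1: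
--             return False
--         return True
--
--     # label propagation: comp[k] is the component label of square k;
--     # a merge rewrites every occurrence of one label in a single pass
--     comp = list(range(n))
--     ans = n
--     for i in range(n - 1):
--         for j in range(i + 1, n):
--             if is_collide(squares[i], squares[j]):
--                 a, b = comp[i], comp[j]
--                 if a != b:
--                     comp = [a if c == b else c for c in comp]
--                     ans -= 1
--
--     if any(is_collide(square, [0, 0, 0, 0]) for square in squares):
--         ans -= 1
--
--     return ans
-- ===== Notes on version B (the rewrite author's own statement) =====
-- stated objective: alternative
-- what changed: Replaces the union-find structure (parent array with union-by-rank and path compression, recursive find) by flat label propagation: a single component-label array where each merge rewrites one label into another in one pass, and the final break-loop becomes an any() check.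
-- outside the precondition, e.g. on solution(0, [[0, 0, 1, 1], [1, 2]]): A returns -1, B returns -1
import Mathlib
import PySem

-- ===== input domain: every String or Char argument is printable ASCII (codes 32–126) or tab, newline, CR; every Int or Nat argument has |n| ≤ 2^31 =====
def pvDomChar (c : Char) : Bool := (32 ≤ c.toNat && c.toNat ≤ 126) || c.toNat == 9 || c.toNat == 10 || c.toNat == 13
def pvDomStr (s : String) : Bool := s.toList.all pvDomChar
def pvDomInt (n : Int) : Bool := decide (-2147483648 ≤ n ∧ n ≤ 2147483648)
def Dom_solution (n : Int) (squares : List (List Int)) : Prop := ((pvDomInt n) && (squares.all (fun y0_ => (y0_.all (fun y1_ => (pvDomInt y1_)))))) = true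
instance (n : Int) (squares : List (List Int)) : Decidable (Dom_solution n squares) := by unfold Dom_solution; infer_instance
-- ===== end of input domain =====

-- B replaces A's union-find (rank + path compression) by label propagation over a flat
-- component-label array (one-pass relabel on merge); same cost class, alternative algorithm.

-- helpers shared by both ports (both Pythons contain the identical is_collide and the
-- identical squares[i] / list indexing; getI/setI are exact for the nonnegative in-range
-- indices both programs use)
def getI (l : List Int) (x : Int) : Int := (PySem.List.pyGet? l x).getD 0
def getSq (squares : List (List Int)) (i : Int) : List Int := (PySem.List.pyGet? squares i).getD []

-- is_collide; Python raises ValueError unpacking a square of length ≠ 4 — excluded by Pre_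
def isCollide (s1 s2 : List Int) : Bool :=
  match s1, s2 with
  | [x11, y11, x21, y21], [x12, y12, x22, y22] =>
    if x21 < x12 ∨ x11 > x22 ∨ y21 < y12 ∨ y11 > y22 then false
    else if x11 < x12 ∧ y11 < y12 ∧ x21 > x22 ∧ y21 > y22 then false
    else if x12 < x11 ∧ y12 < y11 ∧ x22 > x21 ∧ y22 > y21 then false
    else true
  | _, _ => false

-- ===== PORT A =====
-- find with path compression; fuel = len(par) only makes the recursion structural — the
-- Python recursion always terminates within that many steps (rank strictly increases along
-- parent links, proved below), so the fuel branch is never taken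
def findA : Nat → List Int → Int → List Int × Int
  | 0, par, x => (par, x)
  | f + 1, par, x =>
    let p := getI par x
    if x ≠ p then
      let pr := findA f par p
      (PySem.List.pySetD pr.1 x pr.2, pr.2)
    else (par, x)

def unionA (par rnk : List Int) (a b : Int) : List Int × List Int × Bool :=
  let fa := findA par.length par a
  let fb := findA fa.1.length fa.1 b
  let ra := fa.2
  let rb := fb.2
  if ra = rb then (fb.1, rnk, false)
  else if getI rnk ra > getI rnk rb then (PySem.List.pySetD fb.1 rb ra, rnk, true)
  else if getI rnk ra < getI rnk rb then (PySem.List.pySetD fb.1 ra rb, rnk, true)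
  else (PySem.List.pySetD fb.1 rb ra, PySem.List.pySetD rnk ra (getI rnk ra + 1), true)

def stepA (squares : List (List Int)) (i : Int) (st : List Int × List Int × Int) (j : Int) :
    List Int × List Int × Int :=
  if isCollide (getSq squares i) (getSq squares j) then
    let u := unionA st.1 st.2.1 i j
    if u.2.2 then (u.1, u.2.1, st.2.2 - 1) else (u.1, u.2.1, st.2.2)
  else st

-- the final 'for square in squares: if is_collide(...): ans -= 1; break'
def adjustA : List (List Int) → Int → Int
  | [], ans => ans
  | s :: t, ans => if isCollide s [0, 0, 0, 0] then ans - 1 else adjustA t ans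

def solution (n : Int) (squares : List (List Int)) : Int :=
  let st :=
    (PySem.List.pyRange 0 (n - 1) 1).foldl
      (fun st i => (PySem.List.pyRange (i + 1) n 1).foldl (stepA squares i) st)
      (PySem.List.pyRange 0 n 1, (PySem.List.pyRange 0 n 1).map (fun _ => (1 : Int)), n)
  adjustA squares st.2.2

-- ===== PORT B =====
def relabel (comp : List Int) (a b : Int) : List Int := comp.map (fun c => if c = b then a else c)

def stepB (squares : List (List Int)) (i : Int) (st : List Int × Int) (j : Int) : List Int × Int :=
  if isCollide (getSq squares i) (getSq squares j) then
    let a := getI st.1 i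
    let b := getI st.1 j
    if a ≠ b then (relabel st.1 a b, st.2 - 1) else st
  else st

def solution_alt (n : Int) (squares : List (List Int)) : Int :=
  let st :=
    (PySem.List.pyRange 0 (n - 1) 1).foldl
      (fun st i => (PySem.List.pyRange (i + 1) n 1).foldl (stepB squares i) st)
      (PySem.List.pyRange 0 n 1, n)
  if squares.any (fun s => isCollide s [0, 0, 0, 0]) then st.2 - 1 else st.2

-- ===== PRECONDITION & SPEC =====
-- Pre_ excludes the inputs where the Python A raises: IndexError when n ≥ 2 exceeds
-- len(squares) (for n ≤ 1 no square is ever indexed) and ValueError unpacking a square whose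
-- length is not 4; requiring length 4 of every square is slightly narrower than A's raise set,
-- since the final loop's break can skip a malformed square after one touching the origin.
def Pre_solution (n : Int) (squares : List (List Int)) : Prop :=
  (n ≤ (squares.length : Int) ∨ n ≤ 1) ∧ ∀ s ∈ squares, s.length = 4

instance (n : Int) (squares : List (List Int)) : Decidable (Pre_solution n squares) := by
  unfold Pre_solution; infer_instance

def pvWitness_solution : Int × List (List Int) := (2, [[0, 0, 1, 1], [1, 1, 2, 2]])

def Spec_solution (n : Int) (squares : List (List Int)) (out : Int) : Prop := out = solution_alt n squares
instance (n : Int) (squares : List (List Int)) (out : Int) : Decidable (Spec_solution n squares out) := by unfold Spec_solution; infer_instance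

-- ===== CLAIM (what is proved, stated in full; the proofs are below) =====
def Claim_equal_solution : Prop := ∀ (n : Int) (squares : List (List Int)), Dom_solution n squares → Pre_solution n squares → Spec_solution n squares (solution n squares)

-- ===== LEMMAS AND PROOFS =====

-- small bridges for getI / pySetD on the nonnegative in-range indices the programs use
lemma getI_eq_getD (l : List Int) (x : Int) (hx : 0 ≤ x) : getI l x = l.getD x.toNat 0 := by
  rw [getI, show PySem.List.pyGet? l x = l[x.toNat]? from PySem.List.pyGet?_of_nonneg l hx]; rfl

lemma getI_set_self (l : List Int) (x : Int) (v : Int) (hx : 0 ≤ x) (hx2 : x < (l.length : Int)) :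
    getI (PySem.List.pySetD l x v) x = v := by
  rw [PySem.List.pySetD_of_nonneg l v hx, getI_eq_getD _ _ hx]
  have h : x.toNat < l.length := by omega
  simp [List.getD, h]

lemma getI_set_ne (l : List Int) (x v y : Int) (hx : 0 ≤ x) (hy : 0 ≤ y) (hne : y ≠ x) :
    getI (PySem.List.pySetD l x v) y = getI l y := by
  rw [PySem.List.pySetD_of_nonneg l v hx, getI_eq_getD _ _ hy, getI_eq_getD _ _ hy]
  have h : x.toNat ≠ y.toNat := by omega
  simp [List.getD, h]

lemma length_setI (l : List Int) (x v : Int) : (PySem.List.pySetD l x v).length = l.length := by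
  exact PySem.List.length_pySetD l x v

lemma getI_relabel (comp : List Int) (a b y : Int) (hy : 0 ≤ y) (hy2 : y < (comp.length : Int)) :
    getI (relabel comp a b) y = (if getI comp y = b then a else getI comp y) := by
  rw [relabel, getI_eq_getD _ _ hy, getI_eq_getD _ _ hy]
  have h : y.toNat < comp.length := by omega
  simp [List.getD, List.getElem?_map, List.getElem?_eq_getElem h]

lemma getI_pyRange (n x : Int) (hx : 0 ≤ x) (hx2 : x < n) : getI (PySem.List.pyRange 0 n 1) x = x := by
  rw [getI_eq_getD _ _ hx]
  have h : x.toNat < (PySem.List.pyRange 0 n 1).length := by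
    rw [PySem.List.length_pyRange_one]; omega
  rw [List.getD, List.getElem?_eq_getElem h, Option.getD_some, PySem.List.getElem_pyRange_one]
  omega

lemma getI_rank0 (n x : Int) (hx : 0 ≤ x) (hx2 : x < n) :
    getI ((PySem.List.pyRange 0 n 1).map (fun _ => (1 : Int))) x = 1 := by
  rw [getI_eq_getD _ _ hx]
  have h2 : x.toNat < n.toNat := by omega
  simp [List.getD, h2]

-- the coupling invariant: A's (par, rank, ans) against B's label array comp
structure UF (par rnk comp : List Int) (ans : Int) : Prop where
  lenR : rnk.length = par.length
  lenC : comp.length = par.length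
  parB : ∀ x : Int, 0 ≤ x → x < (par.length : Int) → 0 ≤ getI par x ∧ getI par x < (par.length : Int)
  rnkLo : ∀ x : Int, 0 ≤ x → x < (par.length : Int) → 1 ≤ getI rnk x
  rnkHi : ∀ x : Int, 0 ≤ x → x < (par.length : Int) → getI rnk x + ans ≤ (par.length : Int) + 1
  inc : ∀ x : Int, 0 ≤ x → x < (par.length : Int) → getI par x ≠ x → getI rnk x + 1 ≤ getI rnk (getI par x)
  lab : ∀ x : Int, 0 ≤ x → x < (par.length : Int) → getI comp x = getI comp (getI par x)
  inj : ∀ x y : Int, 0 ≤ x → x < (par.length : Int) → 0 ≤ y → y < (par.length : Int) →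
      getI par x = x → getI par y = y → getI comp x = getI comp y → x = y
  cnt : ans = (((Finset.range par.length).filter (fun i : Nat => getI par (i : Int) = (i : Int))).card : Int)

-- postcondition of findA (path compression): root found, structure preserved, labels respected
structure FindRes (rnk comp par : List Int) (x : Int) (par' : List Int) (r : Int) : Prop where
  len : par'.length = par.length
  rBnd : 0 ≤ r ∧ r < (par.length : Int)
  rootOld : getI par r = r
  rUp : getI rnk x ≤ getI rnk r
  parB' : ∀ y : Int, 0 ≤ y → y < (par.length : Int) → 0 ≤ getI par' y ∧ getI par' y < (par.length : Int)
  inc' : ∀ y : Int, 0 ≤ y → y < (par.length : Int) → getI par' y ≠ y → getI rnk y + 1 ≤ getI rnk (getI par' y)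
  roots' : ∀ y : Int, 0 ≤ y → y < (par.length : Int) → (getI par' y = y ↔ getI par y = y)
  lab' : ∀ y : Int, 0 ≤ y → y < (par.length : Int) → getI comp y = getI comp (getI par' y)
  labX : getI comp x = getI comp r

lemma findA_spec (rnk comp : List Int) :
    ∀ (f : Nat) (par : List Int) (x : Int),
    (∀ y : Int, 0 ≤ y → y < (par.length : Int) → 0 ≤ getI par y ∧ getI par y < (par.length : Int)) →
    (∀ y : Int, 0 ≤ y → y < (par.length : Int) → getI par y ≠ y → getI rnk y + 1 ≤ getI rnk (getI par y)) →
    (∀ y : Int, 0 ≤ y → y < (par.length : Int) → getI comp y = getI comp (getI par y)) →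
    (∀ y : Int, 0 ≤ y → y < (par.length : Int) → getI rnk y ≤ (par.length : Int)) →
    0 ≤ x → x < (par.length : Int) →
    (par.length : Int) + 1 ≤ (f : Int) + getI rnk x →
    FindRes rnk comp par x (findA f par x).1 (findA f par x).2 := by
  intro f
  induction f with
  | zero =>
    intro par x hB hI hL hR hx hx2 hfuel
    exfalso; have := hR x hx hx2; push_cast at hfuel; omega
  | succ f ih =>
    intro par x hB hI hL hR hx hx2 hfuel
    by_cases hxp : x ≠ getI par x
    · have hgoal : findA (f + 1) par x =
          (PySem.List.pySetD (findA f par (getI par x)).1 x (findA f par (getI par x)).2,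
            (findA f par (getI par x)).2) := by
        simp only [findA, if_pos hxp]
      obtain ⟨hp0, hpN⟩ := hB x hx hx2
      have hinc := hI x hx hx2 (Ne.symm hxp)
      have hfuel' : (par.length : Int) + 1 ≤ (f : Int) + getI rnk (getI par x) := by
        push_cast at hfuel ⊢; omega
      have IH := ih par (getI par x) hB hI hL hR hp0 hpN hfuel'
      set r := (findA f par (getI par x)).2 with hr
      set par1 := (findA f par (getI par x)).1 with hpar1
      have hrup : getI rnk (getI par x) ≤ getI rnk r := IH.rUp
      have hrne : r ≠ x := by
        intro he; rw [he] at hrup; omega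
      have hlen1 : par1.length = par.length := IH.len
      have hxN1 : x < (par1.length : Int) := by rw [hlen1]; exact hx2
      have hg1 : (findA (f + 1) par x).1 = PySem.List.pySetD par1 x r := by rw [hgoal]
      have hg2 : (findA (f + 1) par x).2 = r := by rw [hgoal]
      rw [hg1, hg2]
      constructor
      · rw [length_setI, hlen1]
      · exact IH.rBnd
      · exact IH.rootOld
      · omega
      · intro y hy hy2
        by_cases hyx : y = x
        · subst hyx
          rw [getI_set_self par1 y r hy (by omega)]
          exact IH.rBnd
        · rw [getI_set_ne par1 x r y hx hy hyx]
          exact IH.parB' y hy hy2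
      · intro y hy hy2 hne
        by_cases hyx : y = x
        · subst hyx
          rw [getI_set_self par1 y r hy (by omega)] at *
          omega
        · rw [getI_set_ne par1 x r y hx hy hyx] at *
          exact IH.inc' y hy hy2 hne
      · intro y hy hy2
        by_cases hyx : y = x
        · subst hyx
          rw [getI_set_self par1 y r hy (by omega)]
          constructor <;> (intro he; omega)
        · rw [getI_set_ne par1 x r y hx hy hyx]
          exact IH.roots' y hy hy2
      · intro y hy hy2
        by_cases hyx : y = x
        · subst hyx
          rw [getI_set_self par1 y r hy (by omega)]
          calc getI comp y = getI comp (getI par y) := hL y hy hy2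
            _ = getI comp r := IH.labX
        · rw [getI_set_ne par1 x r y hx hy hyx]
          exact IH.lab' y hy hy2
      · calc getI comp x = getI comp (getI par x) := hL x hx hx2
          _ = getI comp r := IH.labX
    · have hgoal : findA (f + 1) par x = (par, x) := by
        simp only [findA, if_neg hxp]
      push Not at hxp
      rw [hgoal]
      exact ⟨rfl, ⟨hx, hx2⟩, hxp.symm, le_refl _, hB, hI, fun y hy hy2 => Iff.rfl, hL, rfl⟩

-- a root always exists (take a vertex of maximal rank)
lemma exists_root (par rnk : List Int)
    (hB : ∀ x : Int, 0 ≤ x → x < (par.length : Int) → 0 ≤ getI par x ∧ getI par x < (par.length : Int))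
    (hI : ∀ x : Int, 0 ≤ x → x < (par.length : Int) → getI par x ≠ x → getI rnk x + 1 ≤ getI rnk (getI par x))
    (hn : 0 < par.length) :
    ∃ x : Int, 0 ≤ x ∧ x < (par.length : Int) ∧ getI par x = x := by
  obtain ⟨x0, hx0, hmax⟩ := Finset.exists_max_image (Finset.range par.length)
    (fun i : Nat => getI rnk (i : Int)) ⟨0, Finset.mem_range.mpr hn⟩
  rw [Finset.mem_range] at hx0
  refine ⟨(x0 : Int), by positivity, by exact_mod_cast hx0, ?_⟩
  by_contra hne
  have hb := hB (x0 : Int) (by positivity) (by exact_mod_cast hx0)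
  have hi := hI (x0 : Int) (by positivity) (by exact_mod_cast hx0) hne
  have hk : (getI par (x0 : Int)).toNat ∈ Finset.range par.length := by
    rw [Finset.mem_range]; omega
  have := hmax _ hk
  rw [Int.toNat_of_nonneg hb.1] at this
  omega

lemma ans_pos (par rnk comp : List Int) (ans : Int) (H : UF par rnk comp ans) (hn : 0 < par.length) :
    1 ≤ ans := by
  have hroot := exists_root par rnk H.parB H.inc hn
  obtain ⟨x, hx, hx2, hr⟩ := hroot
  have hmem : x.toNat ∈ (Finset.range par.length).filter (fun i : Nat => getI par (i : Int) = (i : Int)) := by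
    rw [Finset.mem_filter, Finset.mem_range]
    refine ⟨by omega, ?_⟩
    rw [Int.toNat_of_nonneg hx]
    exact hr
  have hcard := Finset.card_pos.mpr ⟨x.toNat, hmem⟩
  rw [H.cnt]
  exact_mod_cast hcard

lemma rankBound (par rnk comp : List Int) (ans : Int) (H : UF par rnk comp ans) (hn : 0 < par.length) :
    ∀ y : Int, 0 ≤ y → y < (par.length : Int) → getI rnk y ≤ (par.length : Int) := by
  intro y hy hy2
  have h1 := H.rnkHi y hy hy2
  have h2 := ans_pos par rnk comp ans H hn
  omega


lemma merge_UF (par rnk comp par2 rnk' : List Int) (ans a b ra rb d k : Int)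
    (H : UF par rnk comp ans)
    (hlen2 : par2.length = par.length)
    (parB2 : ∀ y : Int, 0 ≤ y → y < (par.length : Int) → 0 ≤ getI par2 y ∧ getI par2 y < (par.length : Int))
    (inc2 : ∀ y : Int, 0 ≤ y → y < (par.length : Int) → getI par2 y ≠ y → getI rnk y + 1 ≤ getI rnk (getI par2 y))
    (lab2 : ∀ y : Int, 0 ≤ y → y < (par.length : Int) → getI comp y = getI comp (getI par2 y))
    (roots2 : ∀ y : Int, 0 ≤ y → y < (par.length : Int) → (getI par2 y = y ↔ getI par y = y))
    (hraB : 0 ≤ ra ∧ ra < (par.length : Int)) (hrbB : 0 ≤ rb ∧ rb < (par.length : Int))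
    (hraR : getI par ra = ra) (hrbR : getI par rb = rb)
    (hca : getI comp a = getI comp ra) (hcb : getI comp b = getI comp rb)
    (hne : ra ≠ rb)
    (hdk : (d = rb ∧ k = ra) ∨ (d = ra ∧ k = rb))
    (hlenR' : rnk'.length = par.length)
    (hge : ∀ y : Int, 0 ≤ y → y < (par.length : Int) → getI rnk y ≤ getI rnk' y)
    (heqNR : ∀ y : Int, 0 ≤ y → y < (par.length : Int) → y ≠ k → getI rnk' y = getI rnk y)
    (hLo' : ∀ y : Int, 0 ≤ y → y < (par.length : Int) → 1 ≤ getI rnk' y)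
    (hHi' : ∀ y : Int, 0 ≤ y → y < (par.length : Int) → getI rnk' y + (ans - 1) ≤ (par.length : Int) + 1)
    (hEdge : getI rnk' d + 1 ≤ getI rnk' k) :
    UF (PySem.List.pySetD par2 d k) rnk' (relabel comp (getI comp a) (getI comp b)) (ans - 1) := by
  have hAB : getI comp a ≠ getI comp b := by
    intro he
    exact hne (H.inj ra rb hraB.1 hraB.2 hrbB.1 hrbB.2 hraR hrbR (by rw [← hca, ← hcb, he]))
  have hdB : 0 ≤ d ∧ d < (par.length : Int) := by rcases hdk with ⟨h1, _⟩ | ⟨h1, _⟩ <;> rw [h1] <;> assumption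
  have hkB : 0 ≤ k ∧ k < (par.length : Int) := by rcases hdk with ⟨_, h1⟩ | ⟨_, h1⟩ <;> rw [h1] <;> assumption
  have hdkne : d ≠ k := by rcases hdk with ⟨h1, h2⟩ | ⟨h1, h2⟩ <;> rw [h1, h2] <;> omega
  have hdR : getI par d = d := by rcases hdk with ⟨h1, _⟩ | ⟨h1, _⟩ <;> rw [h1] <;> assumption
  have hkR : getI par k = k := by rcases hdk with ⟨_, h1⟩ | ⟨_, h1⟩ <;> rw [h1] <;> assumption
  have hdR2 : getI par2 d = d := (roots2 d hdB.1 hdB.2).mpr hdR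
  have hkR2 : getI par2 k = k := (roots2 k hkB.1 hkB.2).mpr hkR
  have hlen3 : (PySem.List.pySetD par2 d k).length = par.length := by rw [length_setI, hlen2]
  have hlenC3 : (relabel comp (getI comp a) (getI comp b)).length = par.length := by
    rw [relabel, List.length_map, H.lenC]
  have hgetP3 : ∀ y : Int, 0 ≤ y → y ≠ d → getI (PySem.List.pySetD par2 d k) y = getI par2 y :=
    fun y hy hyne => getI_set_ne par2 d k y hdB.1 hy hyne
  have hgetP3d : getI (PySem.List.pySetD par2 d k) d = k :=
    getI_set_self par2 d k hdB.1 (by rw [hlen2]; exact hdB.2)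
  have hrel : ∀ y : Int, 0 ≤ y → y < (par.length : Int) →
      getI (relabel comp (getI comp a) (getI comp b)) y =
        (if getI comp y = getI comp b then getI comp a else getI comp y) := by
    intro y hy hy2
    exact getI_relabel comp (getI comp a) (getI comp b) y hy (by rw [H.lenC]; exact hy2)
  refine ⟨?_, ?_, ?_, ?_, ?_, ?_, ?_, ?_, ?_⟩
  · rw [hlen3, hlenR']
  · rw [hlen3, hlenC3]
  · intro y hy hy2; rw [hlen3] at hy2 ⊢
    by_cases hyd : y = d
    · subst hyd; rw [hgetP3d]; exact hkB
    · rw [hgetP3 y hy hyd]; exact parB2 y hy hy2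
  · intro y hy hy2; rw [hlen3] at hy2; exact hLo' y hy hy2
  · intro y hy hy2; rw [hlen3] at hy2 ⊢; exact hHi' y hy hy2
  · intro y hy hy2 hroot; rw [hlen3] at hy2
    by_cases hyd : y = d
    · subst hyd; rw [hgetP3d]; rw [hgetP3d] at hroot; exact hEdge
    · rw [hgetP3 y hy hyd] at hroot ⊢
      by_cases hyk : y = k
      · subst hyk; exact absurd hkR2 hroot
      · have hp2 := parB2 y hy hy2
        rw [heqNR y hy hy2 hyk]
        calc getI rnk y + 1 ≤ getI rnk (getI par2 y) := inc2 y hy hy2 hroot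
          _ ≤ getI rnk' (getI par2 y) := hge _ hp2.1 hp2.2
  · intro y hy hy2; rw [hlen3] at hy2
    by_cases hyd : y = d
    · subst hyd; rw [hgetP3d, hrel y hy hy2, hrel k hkB.1 hkB.2]
      rcases hdk with ⟨h1, h2⟩ | ⟨h1, h2⟩
      · rw [h1, h2, ← hcb, ← hca]
        simp [hAB]
      · rw [h1, h2, ← hcb, ← hca]
        simp [hAB]
    · have hp2 := parB2 y hy hy2
      rw [hgetP3 y hy hyd, hrel y hy hy2, hrel _ hp2.1 hp2.2, lab2 y hy hy2]
  · intro x y hx hx2 hy hy2 hrx hry hcxy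
    rw [hlen3] at hx2 hy2
    have hxd : x ≠ d := by intro he; rw [he, hgetP3d] at hrx; exact hdkne hrx.symm
    have hyd : y ≠ d := by intro he; rw [he, hgetP3d] at hry; exact hdkne hry.symm
    rw [hgetP3 x hx hxd] at hrx; rw [hgetP3 y hy hyd] at hry
    have hrx' := (roots2 x hx hx2).mp hrx
    have hry' := (roots2 y hy hy2).mp hry
    rw [hrel x hx hx2, hrel y hy hy2] at hcxy
    by_cases hxB : getI comp x = getI comp b <;> by_cases hyB : getI comp y = getI comp b
    · exact H.inj x y hx hx2 hy hy2 hrx' hry' (by rw [hxB, hyB])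
    · rw [if_pos hxB, if_neg hyB] at hcxy
      have hxrb : x = rb := H.inj x rb hx hx2 hrbB.1 hrbB.2 hrx' hrbR (by rw [hxB, hcb])
      have hyra : y = ra := H.inj y ra hy hy2 hraB.1 hraB.2 hry' hraR (by rw [← hcxy, hca])
      rcases hdk with ⟨h1, _⟩ | ⟨h1, _⟩
      · exact absurd (hxrb.trans h1.symm) hxd
      · exact absurd (hyra.trans h1.symm) hyd
    · rw [if_neg hxB, if_pos hyB] at hcxy
      have hyrb : y = rb := H.inj y rb hy hy2 hrbB.1 hrbB.2 hry' hrbR (by rw [hyB, hcb])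
      have hxra : x = ra := H.inj x ra hx hx2 hraB.1 hraB.2 hrx' hraR (by rw [hcxy, hca])
      rcases hdk with ⟨h1, _⟩ | ⟨h1, _⟩
      · exact absurd (hyrb.trans h1.symm) hyd
      · exact absurd (hxra.trans h1.symm) hxd
    · rw [if_neg hxB, if_neg hyB] at hcxy
      exact H.inj x y hx hx2 hy hy2 hrx' hry' hcxy
  · have hsets : (Finset.range (PySem.List.pySetD par2 d k).length).filter
        (fun i : Nat => getI (PySem.List.pySetD par2 d k) (i : Int) = (i : Int)) =
        ((Finset.range par.length).filter (fun i : Nat => getI par (i : Int) = (i : Int))).erase d.toNat := by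
      ext i
      rw [Finset.mem_erase, Finset.mem_filter, Finset.mem_filter, Finset.mem_range, Finset.mem_range, hlen3]
      by_cases hid : i = d.toNat
      · subst hid
        have hcast : ((d.toNat : Nat) : Int) = d := Int.toNat_of_nonneg hdB.1
        constructor
        · rintro ⟨hi, hroot⟩
          rw [hcast, hgetP3d] at hroot
          exact absurd hroot.symm hdkne
        · rintro ⟨hne', _⟩; exact absurd rfl hne'
      · have hcastne : (i : Int) ≠ d := by omega
        constructor
        · rintro ⟨hi, hroot⟩
          rw [hgetP3 (i : Int) (by positivity) hcastne] at hroot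
          exact ⟨hid, hi, (roots2 (i : Int) (by positivity) (by exact_mod_cast hi)).mp hroot⟩
        · rintro ⟨_, hi, hroot⟩
          refine ⟨hi, ?_⟩
          rw [hgetP3 (i : Int) (by positivity) hcastne]
          exact (roots2 (i : Int) (by positivity) (by exact_mod_cast hi)).mpr hroot
    have hdmem : d.toNat ∈ (Finset.range par.length).filter (fun i : Nat => getI par (i : Int) = (i : Int)) := by
      rw [Finset.mem_filter, Finset.mem_range]
      have hcast : ((d.toNat : Nat) : Int) = d := Int.toNat_of_nonneg hdB.1
      exact ⟨by omega, by rw [hcast]; exact hdR⟩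
    rw [hsets, Finset.card_erase_of_mem hdmem, H.cnt]
    have hpos := Finset.card_pos.mpr ⟨d.toNat, hdmem⟩
    push_cast [Nat.cast_sub hpos]
    ring

lemma unionA_spec (par rnk comp : List Int) (ans a b : Int) (H : UF par rnk comp ans)
    (ha : 0 ≤ a) (ha2 : a < (par.length : Int)) (hb : 0 ≤ b) (hb2 : b < (par.length : Int)) :
    ((unionA par rnk a b).2.2 = true ↔ getI comp a ≠ getI comp b) ∧
    (unionA par rnk a b).1.length = par.length ∧
    UF (unionA par rnk a b).1 (unionA par rnk a b).2.1
      (if (unionA par rnk a b).2.2 then relabel comp (getI comp a) (getI comp b) else comp)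
      (if (unionA par rnk a b).2.2 then ans - 1 else ans) := by
  have hn : 0 < par.length := by omega
  have hR := rankBound par rnk comp ans H hn
  have F1 := findA_spec rnk comp par.length par a H.parB H.inc H.lab hR ha ha2
    (by have := H.rnkLo a ha ha2; omega)
  set par1 := (findA par.length par a).1 with hpar1
  set ra := (findA par.length par a).2 with hra
  have hlen1 : par1.length = par.length := F1.len
  have hB1 : ∀ y : Int, 0 ≤ y → y < (par1.length : Int) → 0 ≤ getI par1 y ∧ getI par1 y < (par1.length : Int) := by
    rw [hlen1]; exact F1.parB'
  have hI1 : ∀ y : Int, 0 ≤ y → y < (par1.length : Int) → getI par1 y ≠ y → getI rnk y + 1 ≤ getI rnk (getI par1 y) := by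
    rw [hlen1]; exact F1.inc'
  have hL1 : ∀ y : Int, 0 ≤ y → y < (par1.length : Int) → getI comp y = getI comp (getI par1 y) := by
    rw [hlen1]; exact F1.lab'
  have hR1 : ∀ y : Int, 0 ≤ y → y < (par1.length : Int) → getI rnk y ≤ (par1.length : Int) := by
    rw [hlen1]; exact hR
  have F2 := findA_spec rnk comp par1.length par1 b hB1 hI1 hL1 hR1 hb (by rw [hlen1]; exact hb2)
    (by have := H.rnkLo b hb hb2; rw [hlen1]; omega)
  set par2 := (findA par1.length par1 b).1 with hpar2
  set rb := (findA par1.length par1 b).2 with hrb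
  have hlen2 : par2.length = par.length := F2.len.trans hlen1
  have hraB : 0 ≤ ra ∧ ra < (par.length : Int) := F1.rBnd
  have hrbB : 0 ≤ rb ∧ rb < (par.length : Int) := by have := F2.rBnd; rw [hlen1] at this; exact this
  have hraR : getI par ra = ra := F1.rootOld
  have hrbR1 : getI par1 rb = rb := F2.rootOld
  have hrbR : getI par rb = rb := (F1.roots' rb hrbB.1 hrbB.2).mp hrbR1
  have hca : getI comp a = getI comp ra := F1.labX
  have hcb : getI comp b = getI comp rb := F2.labX
  -- structural facts about par2 over par
  have parB2 : ∀ y : Int, 0 ≤ y → y < (par.length : Int) → 0 ≤ getI par2 y ∧ getI par2 y < (par.length : Int) := by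
    have := F2.parB'; rw [hlen1] at this; exact this
  have inc2 : ∀ y : Int, 0 ≤ y → y < (par.length : Int) → getI par2 y ≠ y → getI rnk y + 1 ≤ getI rnk (getI par2 y) := by
    have := F2.inc'; rw [hlen1] at this; exact this
  have lab2 : ∀ y : Int, 0 ≤ y → y < (par.length : Int) → getI comp y = getI comp (getI par2 y) := by
    have := F2.lab'; rw [hlen1] at this; exact this
  have roots2 : ∀ y : Int, 0 ≤ y → y < (par.length : Int) → (getI par2 y = y ↔ getI par y = y) := by
    intro y hy hy2
    have h2 := F2.roots' y hy (by rw [hlen1]; exact hy2)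
    exact h2.trans (F1.roots' y hy hy2)
  have hiff : ra = rb ↔ getI comp a = getI comp b := by
    constructor
    · intro he; rw [hca, hcb, he]
    · intro he
      exact H.inj ra rb hraB.1 hraB.2 hrbB.1 hrbB.2 hraR hrbR (by rw [← hca, ← hcb, he])
  by_cases heq : ra = rb
  · have hu : unionA par rnk a b = (par2, rnk, false) := by
      simp only [unionA]
      simp only [← hpar1, ← hra, ← hpar2, ← hrb]
      rw [if_pos heq]
    rw [hu]
    refine ⟨by simp [hiff.mp heq], hlen2, ?_⟩
    show UF par2 rnk comp ans
    refine ⟨by rw [H.lenR, hlen2], by rw [H.lenC, hlen2], ?_, ?_, ?_, ?_, ?_, ?_, ?_⟩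
    · rw [hlen2]; exact parB2
    · rw [hlen2]; exact fun y hy hy2 => H.rnkLo y hy hy2
    · rw [hlen2]; exact fun y hy hy2 => H.rnkHi y hy hy2
    · rw [hlen2]; exact inc2
    · rw [hlen2]; exact lab2
    · rw [hlen2]
      intro x y hx hx2 hy hy2 hrx hry hcxy
      exact H.inj x y hx hx2 hy hy2 ((roots2 x hx hx2).mp hrx) ((roots2 y hy hy2).mp hry) hcxy
    · rw [H.cnt, hlen2]
      congr 1
      refine congrArg Finset.card (Finset.filter_congr ?_)
      intro i hi
      rw [Finset.mem_range] at hi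
      exact (roots2 (i : Int) (by positivity) (by exact_mod_cast hi)).symm
  · have hABne : getI comp a ≠ getI comp b := fun he => heq (hiff.mpr he)
    by_cases h1 : getI rnk ra > getI rnk rb
    · have hu : unionA par rnk a b = (PySem.List.pySetD par2 rb ra, rnk, true) := by
        simp only [unionA]
        simp only [← hpar1, ← hra, ← hpar2, ← hrb]
        rw [if_neg heq, if_pos h1]
      rw [hu]
      refine ⟨by simp [hABne], by rw [length_setI, hlen2], ?_⟩
      show UF (PySem.List.pySetD par2 rb ra) rnk (relabel comp (getI comp a) (getI comp b)) (ans - 1)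
      exact merge_UF par rnk comp par2 rnk ans a b ra rb rb ra H hlen2 parB2 inc2 lab2 roots2
        hraB hrbB hraR hrbR hca hcb heq (Or.inl ⟨rfl, rfl⟩) H.lenR
        (fun y hy hy2 => le_refl _) (fun y hy hy2 _ => rfl)
        H.rnkLo (fun y hy hy2 => by have := H.rnkHi y hy hy2; omega) (by omega)
    · by_cases h2 : getI rnk ra < getI rnk rb
      · have hu : unionA par rnk a b = (PySem.List.pySetD par2 ra rb, rnk, true) := by
          simp only [unionA]
          simp only [← hpar1, ← hra, ← hpar2, ← hrb]
          rw [if_neg heq, if_neg h1, if_pos h2]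
        rw [hu]
        refine ⟨by simp [hABne], by rw [length_setI, hlen2], ?_⟩
        show UF (PySem.List.pySetD par2 ra rb) rnk (relabel comp (getI comp a) (getI comp b)) (ans - 1)
        exact merge_UF par rnk comp par2 rnk ans a b ra rb ra rb H hlen2 parB2 inc2 lab2 roots2
          hraB hrbB hraR hrbR hca hcb heq (Or.inr ⟨rfl, rfl⟩) H.lenR
          (fun y hy hy2 => le_refl _) (fun y hy hy2 _ => rfl)
          H.rnkLo (fun y hy hy2 => by have := H.rnkHi y hy hy2; omega) (by omega)
      · have hu : unionA par rnk a b =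
            (PySem.List.pySetD par2 rb ra, PySem.List.pySetD rnk ra (getI rnk ra + 1), true) := by
          simp only [unionA]
          simp only [← hpar1, ← hra, ← hpar2, ← hrb]
          rw [if_neg heq, if_neg h1, if_neg h2]
        rw [hu]
        refine ⟨by simp [hABne], by rw [length_setI, hlen2], ?_⟩
        show UF (PySem.List.pySetD par2 rb ra) (PySem.List.pySetD rnk ra (getI rnk ra + 1))
          (relabel comp (getI comp a) (getI comp b)) (ans - 1)
        have hrnkset : ∀ y : Int, 0 ≤ y → y ≠ ra →
            getI (PySem.List.pySetD rnk ra (getI rnk ra + 1)) y = getI rnk y :=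
          fun y hy hyne => getI_set_ne rnk ra (getI rnk ra + 1) y hraB.1 hy hyne
        have hrnksetra : getI (PySem.List.pySetD rnk ra (getI rnk ra + 1)) ra = getI rnk ra + 1 :=
          getI_set_self rnk ra (getI rnk ra + 1) hraB.1 (by rw [H.lenR]; exact hraB.2)
        refine merge_UF par rnk comp par2 (PySem.List.pySetD rnk ra (getI rnk ra + 1)) ans a b ra rb rb ra
          H hlen2 parB2 inc2 lab2 roots2 hraB hrbB hraR hrbR hca hcb heq (Or.inl ⟨rfl, rfl⟩)
          (by rw [length_setI, H.lenR]) ?_ ?_ ?_ ?_ ?_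
        · intro y hy hy2
          by_cases hyra : y = ra
          · rw [hyra, hrnksetra]; omega
          · rw [hrnkset y hy hyra]
        · intro y hy hy2 hyk; rw [hrnkset y hy hyk]
        · intro y hy hy2
          by_cases hyra : y = ra
          · rw [hyra, hrnksetra]; have := H.rnkLo ra hraB.1 hraB.2; omega
          · rw [hrnkset y hy hyra]; exact H.rnkLo y hy hy2
        · intro y hy hy2
          by_cases hyra : y = ra
          · rw [hyra, hrnksetra]; have := H.rnkHi ra hraB.1 hraB.2; omega
          · rw [hrnkset y hy hyra]; have := H.rnkHi y hy hy2; omega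
        · rw [hrnkset rb hrbB.1 (fun he => heq he.symm), hrnksetra]; omega

def Coupled (n0 : Nat) (sA : List Int × List Int × Int) (sB : List Int × Int) : Prop :=
  sA.1.length = n0 ∧ UF sA.1 sA.2.1 sB.1 sA.2.2 ∧ sB.2 = sA.2.2

lemma step_coupled (squares : List (List Int)) (n0 : Nat) (i j : Int) (sA : List Int × List Int × Int)
    (sB : List Int × Int) (hi : 0 ≤ i) (hi2 : i < (n0 : Int)) (hj : 0 ≤ j) (hj2 : j < (n0 : Int))
    (H : Coupled n0 sA sB) : Coupled n0 (stepA squares i sA j) (stepB squares i sB j) := by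
  obtain ⟨hlen, HU, hans⟩ := H
  have hi2' : i < (sA.1.length : Int) := by rw [hlen]; exact hi2
  have hj2' : j < (sA.1.length : Int) := by rw [hlen]; exact hj2
  simp only [stepA, stepB]
  by_cases hc : isCollide (getSq squares i) (getSq squares j) = true
  · rw [if_pos hc, if_pos hc]
    have U := unionA_spec sA.1 sA.2.1 sB.1 sA.2.2 i j HU hi hi2' hj hj2'
    by_cases hab : getI sB.1 i ≠ getI sB.1 j
    · have hflag : (unionA sA.1 sA.2.1 i j).2.2 = true := U.1.mpr hab
      rw [if_pos hab, if_pos hflag]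
      have HU' := U.2.2
      simp only [hflag, if_true] at HU'
      exact ⟨U.2.1.trans hlen, HU', by rw [hans]⟩
    · have hflag : (unionA sA.1 sA.2.1 i j).2.2 = false := by
        cases hfl : (unionA sA.1 sA.2.1 i j).2.2
        · rfl
        · exact absurd (U.1.mp hfl) hab
      rw [if_neg hab, if_neg (by rw [hflag]; exact Bool.false_ne_true)]
      have HU' := U.2.2
      simp only [hflag, Bool.false_eq_true, if_false] at HU'
      exact ⟨U.2.1.trans hlen, HU', hans⟩
  · rw [if_neg hc, if_neg hc]
    exact ⟨hlen, HU, hans⟩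

lemma inner_coupled (squares : List (List Int)) (n0 : Nat) (i : Int)
    (hi : 0 ≤ i) (hi2 : i < (n0 : Int)) :
    ∀ (js : List Int) (sA : List Int × List Int × Int) (sB : List Int × Int),
    (∀ j ∈ js, 0 ≤ j ∧ j < (n0 : Int)) → Coupled n0 sA sB →
    Coupled n0 (js.foldl (stepA squares i) sA) (js.foldl (stepB squares i) sB) := by
  intro js
  induction js with
  | nil => intro sA sB _ HC; exact HC
  | cons j t ihr =>
    intro sA sB hmem HC
    simp only [List.foldl_cons]
    refine ihr _ _ (fun x hx => hmem x (List.mem_cons_of_mem _ hx)) ?_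
    obtain ⟨hj, hj2⟩ := hmem j List.mem_cons_self
    exact step_coupled squares n0 i j sA sB hi hi2 hj hj2 HC

lemma outer_coupled (squares : List (List Int)) (n0 : Nat) (n : Int) (hn : n = (n0 : Int)) :
    ∀ (is_ : List Int) (sA : List Int × List Int × Int) (sB : List Int × Int),
    (∀ i ∈ is_, 0 ≤ i ∧ i < (n0 : Int)) → Coupled n0 sA sB →
    Coupled n0
      (is_.foldl (fun st i => (PySem.List.pyRange (i + 1) n 1).foldl (stepA squares i) st) sA)
      (is_.foldl (fun st i => (PySem.List.pyRange (i + 1) n 1).foldl (stepB squares i) st) sB) := by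
  intro is_
  induction is_ with
  | nil => intro sA sB _ HC; exact HC
  | cons i t ihr =>
    intro sA sB hmem HC
    simp only [List.foldl_cons]
    obtain ⟨hi, hi2⟩ := hmem i List.mem_cons_self
    refine ihr _ _ (fun x hx => hmem x (List.mem_cons_of_mem _ hx)) ?_
    refine inner_coupled squares n0 i hi hi2 _ _ _ ?_ HC
    intro j hj
    rw [PySem.List.mem_pyRange_one] at hj
    constructor
    · omega
    · rw [← hn]; exact hj.2

lemma adjustA_eq (squares : List (List Int)) (ans : Int) :
    adjustA squares ans = if squares.any (fun s => isCollide s [0, 0, 0, 0]) then ans - 1 else ans := by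
  induction squares with
  | nil => rfl
  | cons s t ihr =>
    simp only [adjustA, List.any_cons]
    by_cases hc : isCollide s [0, 0, 0, 0] = true
    · simp [hc]
    · simp only [hc]
      rw [ihr]
      simp

lemma init_coupled (n : Int) (hn : 1 ≤ n) :
    Coupled n.toNat
      (PySem.List.pyRange 0 n 1, (PySem.List.pyRange 0 n 1).map (fun _ => (1 : Int)), n)
      (PySem.List.pyRange 0 n 1, n) := by
  have hlenP : (PySem.List.pyRange 0 n 1).length = n.toNat := by
    rw [PySem.List.length_pyRange_one]; omega
  have hN : ((PySem.List.pyRange 0 n 1).length : Int) = n := by rw [hlenP]; omega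
  have hget : ∀ y : Int, 0 ≤ y → y < ((PySem.List.pyRange 0 n 1).length : Int) →
      getI (PySem.List.pyRange 0 n 1) y = y := by
    intro y hy hy2; rw [hN] at hy2; exact getI_pyRange n y hy hy2
  refine ⟨hlenP, ?_, rfl⟩
  show UF (PySem.List.pyRange 0 n 1) ((PySem.List.pyRange 0 n 1).map (fun _ => (1 : Int)))
    (PySem.List.pyRange 0 n 1) n
  refine ⟨?_, ?_, ?_, ?_, ?_, ?_, ?_, ?_, ?_⟩
  · simp
  · simp
  · intro y hy hy2; rw [hget y hy hy2]; exact ⟨hy, hy2⟩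
  · intro y hy hy2
    rw [hN] at hy2
    rw [getI_rank0 n y hy hy2]
  · intro y hy hy2
    rw [hN] at hy2
    rw [getI_rank0 n y hy hy2, hN]
    omega
  · intro y hy hy2 hroot
    exact absurd (hget y hy hy2) hroot
  · intro y hy hy2
    rw [hget y hy hy2]
    exact (hget y hy hy2).symm
  · intro x y hx hx2 hy hy2 _ _ hcxy
    rw [hget x hx hx2, hget y hy hy2] at hcxy
    exact hcxy
  · have hfilter : (Finset.range (PySem.List.pyRange 0 n 1).length).filter
        (fun i : Nat => getI (PySem.List.pyRange 0 n 1) (i : Int) = (i : Int)) =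
        Finset.range (PySem.List.pyRange 0 n 1).length := by
      apply Finset.filter_true_of_mem
      intro i hi
      rw [Finset.mem_range] at hi
      exact hget (i : Int) (by positivity) (by exact_mod_cast hi)
    rw [hfilter, Finset.card_range, hlenP]
    omega

-- ===== VERDICT (by name: the statement is the Claim_ definition above) =====
theorem solution_spec : Claim_equal_solution := by
  intro n squares _ _
  show solution n squares = solution_alt n squares
  simp only [solution, solution_alt]
  by_cases hn1 : n ≤ 0
  · rw [PySem.List.pyRange_one_eq_nil (by omega : n - 1 ≤ 0)]
    simp only [List.foldl_nil]
    exact adjustA_eq squares n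
  · have HC := outer_coupled squares n.toNat n (by omega) (PySem.List.pyRange 0 (n - 1) 1)
      (PySem.List.pyRange 0 n 1, (PySem.List.pyRange 0 n 1).map (fun _ => (1 : Int)), n)
      (PySem.List.pyRange 0 n 1, n)
      (by
        intro i hi
        rw [PySem.List.mem_pyRange_one] at hi
        constructor
        · exact hi.1
        · omega)
      (init_coupled n (by omega))
    obtain ⟨_, _, hans⟩ := HC
    rw [adjustA_eq, hans]
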